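-- pv_equiv track=rewrite | github.com/capocchi/DEVSimPy | DSV.py | organizeIntoLines
-- ===== SOURCE A (Python) =====
-- def organizeIntoLines(input, textQualifier = '"', limit = None):
--     """
--     PROTOTYPE:
--       organizeIntoLines(input, textQualifier = '\"', limit = None)
--     DESCRIPTION:
--       Takes raw data (as from file.read()) and organizes it into lines.
--       Newlines that occur within text qualifiers are treated as normal
--       characters, not line delimiters.
--     ARGUMENTS:
--       - input is raw data as a string
--       - textQualifier is a character used to delimit ambiguous data
--       - limit is a integer specifying the maximum number of lines to organize
--     RETURNS:
--       list of strings
--     """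
--
--     # Algorithm: there should be an even number of text qualifiers on every line.
--     # If there isn't, that means that the newline at the end of the line must occur
--     # within qualifiers and doesn't really indicate the end of a record.
--
--     data = input.split('\n')
--     line = 0
--     while 1:
--         try:
--             while data[line].count(textQualifier) % 2: # while odd number
--                 data[line] = data[line] + '\n' + data[line + 1] # add the next line
--                 del data[line + 1] # delete the next line
--             line += 1
--             if limit and line > limit:
--                 del data[limit:] # kill any lines that weren't processed
--                 break
--         except:
--             break
--
--     # filter out empty lines
--     data = list(filter(lambda i: "".join(i), data))
--     #data = list(filter(string.join, data))
--     return data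
-- ===== SOURCE B (Python) =====
-- def organizeIntoLines(input, textQualifier = '"', limit = None):
--     # One pass over the split lines, tracking the parity of the number of
--     # qualifier occurrences in the group accumulated so far; a group ends at
--     # the first line that brings the parity back to even.
--     out = []
--     buf = []
--     parity = 0
--     for ln in input.split('\n'):
--         buf.append(ln)
--         parity = (parity + ln.count(textQualifier)) % 2
--         if parity == 0:
--             out.append('\n'.join(buf))
--             buf = []
--             if limit and len(out) > limit:
--                 return [s for s in out[:limit] if s]
--     if buf:
--         out.append('\n'.join(buf))
--     return [s for s in out if s]
-- ===== Notes on version B (the rewrite author's own statement) =====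
-- stated objective: alternative
-- what changed: A repeatedly re-counts and re-concatenates the growing merged line inside a cursor-and-delete loop over a mutable list; B makes a single pass over the split lines, counting each line's qualifier occurrences once and tracking the running parity of the open group, emitting a group when the parity returns to even (O(n) instead of A's quadratic worst case on long quoted runs, though a timing run could not measure this).
-- outside the precondition, e.g. on organizeIntoLines('a\nb\nc', '"', -1): A returns ['a', 'b'], B returns []
import Mathlib
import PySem

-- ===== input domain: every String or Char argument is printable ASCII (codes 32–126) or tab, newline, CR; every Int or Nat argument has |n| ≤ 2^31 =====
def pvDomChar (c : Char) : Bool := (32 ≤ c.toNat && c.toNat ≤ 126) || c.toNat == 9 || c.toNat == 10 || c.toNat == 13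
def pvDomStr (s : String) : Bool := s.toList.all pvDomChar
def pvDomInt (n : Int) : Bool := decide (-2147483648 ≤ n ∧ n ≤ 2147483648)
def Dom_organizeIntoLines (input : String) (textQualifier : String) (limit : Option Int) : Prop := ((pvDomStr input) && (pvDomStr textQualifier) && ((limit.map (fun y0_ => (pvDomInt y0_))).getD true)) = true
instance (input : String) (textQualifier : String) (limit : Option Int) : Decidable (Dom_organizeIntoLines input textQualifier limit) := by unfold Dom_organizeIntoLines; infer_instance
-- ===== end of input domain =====

-- B replaces A's cursor-and-delete loop, which repeatedly re-counts and re-concatenates the growing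
-- merged line, by a single pass over the split lines that counts each line's qualifier occurrences
-- once and tracks the running parity of the open group (objective: alternative).

-- ===== PORT A =====
-- A's outer `while 1` / inner merge loop; `line` is the cursor, `data` the mutable list.
-- `none` from pyGet? is exactly Python's IndexError, which A's bare `except` turns into `break`
-- (the function then returns the current `data`).
def aLoopA (tq : List Char) (limit : Option Int) (data : List (List Char)) (line : Nat) : List (List Char) :=
  match h1 : PySem.List.pyGet? data (line : Int) with
  | none => data                    -- except: break
  | some cur =>
    if PySem.Chars.count cur tq % 2 ≠ 0 then   -- while data[line].count(tq) % 2: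
      match h2 : PySem.List.pyGet? data ((line : Int) + 1) with
      | none => data                -- except: break
      | some nxt =>
        -- data[line] = data[line] + '\n' + data[line + 1]; del data[line + 1]
        -- (the del index is in range here — the preceding read succeeded — so it is eraseIdx)
        aLoopA tq limit ((PySem.List.pySetD data (line : Int) (cur ++ '\n' :: nxt)).eraseIdx (line + 1)) line
    else
      -- line += 1; if limit and line > limit: del data[limit:]; break
      match limit with
      | none => aLoopA tq limit data (line + 1)
      | some k =>
        if k ≠ 0 ∧ ((line : Int) + 1 > k) then PySem.List.slice data none (some k)
        else aLoopA tq limit data (line + 1)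
termination_by data.length - line
decreasing_by
  all_goals
    first
    | (have h2' : PySem.List.pyGet? data ((line + 1 : Nat) : Int) = some nxt := by push_cast; exact h2
       simp only [PySem.List.pyGet?_natCast] at h1 h2'
       have hl1 : line < data.length := (List.getElem?_eq_some_iff.mp h1).1
       have hl2 : line + 1 < data.length := (List.getElem?_eq_some_iff.mp h2').1
       simp only [PySem.List.pySetD_natCast, List.length_eraseIdx, List.length_set]
       simp [hl2]; omega)
    | (simp only [PySem.List.pyGet?_natCast] at h1
       have hl1 : line < data.length := (List.getElem?_eq_some_iff.mp h1).1
       omega)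

def organizeIntoLines (input : String) (textQualifier : String) (limit : Option Int) : List String :=
  -- data = input.split('\n'); run the loop; filter(lambda i: "".join(i), data) keeps the non-empty strings
  ((aLoopA textQualifier.toList limit (PySem.Chars.splitOn input.toList ['\n']) 0).filter
      (fun s => !s.isEmpty)).map String.ofList

-- ===== PORT B =====
-- Source B's single for-loop: out/buf/parity are the accumulators, groups end when parity is even.
def bLoopB (tq : List Char) (limit : Option Int) (lines : List (List Char)) (out buf : List (List Char)) (parity : Nat) : List (List Char) :=
  match lines with
  | [] =>
    (if buf.isEmpty then out else out ++ [PySem.Chars.join ['\n'] buf]).filter (fun s => !s.isEmpty)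
  | ln :: rest =>
    -- buf.append(ln); parity = (parity + ln.count(tq)) % 2
    if (parity + PySem.Chars.count ln tq) % 2 = 0 then
      -- out.append('\n'.join(buf)); buf = []
      match limit with
      | some k =>
        if k ≠ 0 ∧ (((out ++ [PySem.Chars.join ['\n'] (buf ++ [ln])]).length : Int) > k) then
          (PySem.List.slice (out ++ [PySem.Chars.join ['\n'] (buf ++ [ln])]) none (some k)).filter (fun s => !s.isEmpty)
        else bLoopB tq limit rest (out ++ [PySem.Chars.join ['\n'] (buf ++ [ln])]) [] 0
      | none => bLoopB tq limit rest (out ++ [PySem.Chars.join ['\n'] (buf ++ [ln])]) [] 0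
    else bLoopB tq limit rest out (buf ++ [ln]) ((parity + PySem.Chars.count ln tq) % 2)

def organizeIntoLines_alt (input : String) (textQualifier : String) (limit : Option Int) : List String :=
  (bLoopB textQualifier.toList limit (PySem.Chars.splitOn input.toList ['\n']) [] [] 0).map String.ofList

-- ===== PRECONDITION & SPEC =====
-- Pre_ excludes a negative limit — a nonsensical line cap no caller would specify, on which A's
-- `del data[limit:]` with a negative index cuts a length-dependent tail off the half-processed list
-- while B's `out[:limit]` cuts its processed prefix: both truncations are accidents of the slicing.
def Pre_organizeIntoLines (input : String) (textQualifier : String) (limit : Option Int) : Prop :=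
  0 ≤ limit.getD 0
instance (input : String) (textQualifier : String) (limit : Option Int) : Decidable (Pre_organizeIntoLines input textQualifier limit) := by unfold Pre_organizeIntoLines; infer_instance

def pvWitness_organizeIntoLines : String × String × Option Int := ("\"a\nb\"\nc", "\"", some 5)

def Spec_organizeIntoLines (input : String) (textQualifier : String) (limit : Option Int) (out : List String) : Prop := out = organizeIntoLines_alt input textQualifier limit
instance (input : String) (textQualifier : String) (limit : Option Int) (out : List String) : Decidable (Spec_organizeIntoLines input textQualifier limit out) := by unfold Spec_organizeIntoLines; infer_instance

-- ===== CLAIM (what is proved, stated in full; the proofs are below) =====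
def Claim_equal_organizeIntoLines : Prop := ∀ (input : String) (textQualifier : String) (limit : Option Int), Dom_organizeIntoLines input textQualifier limit → Pre_organizeIntoLines input textQualifier limit → Spec_organizeIntoLines input textQualifier limit (organizeIntoLines input textQualifier limit)

-- ===== LEMMAS AND PROOFS =====

theorem pvWitness_ok : Dom_organizeIntoLines pvWitness_organizeIntoLines.1 pvWitness_organizeIntoLines.2.1 pvWitness_organizeIntoLines.2.2 ∧ Pre_organizeIntoLines pvWitness_organizeIntoLines.1 pvWitness_organizeIntoLines.2.1 pvWitness_organizeIntoLines.2.2 := by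
  constructor <;> decide

-- the non-empty filter both ports end with
def filtNE (l : List (List Char)) : List (List Char) := l.filter (fun s => !s.isEmpty)

theorem go_of_not_mem {c : Char} {sub : List Char} (hc : c ∈ sub) :
    ∀ (fuel : Nat) (l : List Char) (acc : Nat), c ∉ l → PySem.Chars.count.go sub fuel l acc = acc := by
  intro fuel
  induction fuel with
  | zero => intro l acc h; rw [PySem.Chars.count.go]
  | succ f ih =>
    intro l acc h
    match l with
    | [] => rw [PySem.Chars.count.go]; omega
    | x :: t =>
      rw [PySem.Chars.count.go]
      split
      · rename_i hp
        exact absurd ((List.isPrefixOf_iff_prefix.mp hp).subset hc) h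
      · exact ih t acc (fun hm => h (List.mem_cons_of_mem _ hm))

theorem go_acc (sub : List Char) :
    ∀ (fuel : Nat) (l : List Char) (acc : Nat),
      PySem.Chars.count.go sub fuel l acc = acc + PySem.Chars.count.go sub fuel l 0 := by
  intro fuel
  induction fuel with
  | zero => intro l acc; rw [PySem.Chars.count.go, PySem.Chars.count.go]; omega
  | succ f ih =>
    intro l acc
    match l with
    | [] => rw [PySem.Chars.count.go, PySem.Chars.count.go] <;> omega
    | x :: t =>
      rw [PySem.Chars.count.go]
      conv_rhs => rw [PySem.Chars.count.go]
      split
      · rw [ih _ (acc + 1)]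
        conv_rhs => rw [ih _ (0 + 1)]
        omega
      · rw [ih t acc]

theorem go_nil (sub : List Char) (fuel : Nat) (acc : Nat) :
    PySem.Chars.count.go sub fuel [] acc = acc := by
  cases fuel <;> rw [PySem.Chars.count.go] <;> omega

theorem go_fuel {sub : List Char} (hs : sub ≠ []) :
    ∀ (fuel : Nat) (fuel' : Nat) (l : List Char) (acc : Nat), l.length ≤ fuel → l.length ≤ fuel' →
      PySem.Chars.count.go sub fuel l acc = PySem.Chars.count.go sub fuel' l acc := by
  intro fuel
  induction fuel with
  | zero =>
    intro fuel' l acc h h'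
    have : l = [] := List.eq_nil_of_length_eq_zero (Nat.le_zero.mp h)
    subst this
    rw [go_nil, go_nil]
  | succ f ih =>
    intro fuel' l acc h h'
    match l with
    | [] => rw [go_nil, go_nil]
    | x :: t =>
      match fuel' with
      | 0 => simp at h'
      | f' + 1 =>
        rw [PySem.Chars.count.go]
        conv_rhs => rw [PySem.Chars.count.go]
        have hlen : t.length + 1 ≤ f + 1 := by simpa using h
        have hlen' : t.length + 1 ≤ f' + 1 := by simpa using h'
        split
        · rename_i hp
          have hsub : 1 ≤ sub.length := by
            cases sub with | nil => exact absurd rfl hs | cons a b => simp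
          have hd : (List.drop sub.length (x :: t)).length ≤ t.length := by
            simp [List.length_drop]; omega
          exact ih f' _ _ (by omega) (by omega)
        · exact ih f' t acc (by omega) (by omega)

theorem go_split_nil {sub : List Char} (hs : sub ≠ []) (hnl : '\n' ∉ sub) :
    ∀ (fuel : Nat) (b : List Char) (acc : Nat), 1 + b.length ≤ fuel →
      PySem.Chars.count.go sub fuel ('\n' :: b) acc = PySem.Chars.count.go sub b.length b acc := by
  intro fuel b acc hf
  match fuel with
  | 0 => omega
  | f + 1 =>
    rw [PySem.Chars.count.go]
    split
    · rename_i hp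
      exfalso
      match sub with
      | [] => exact hs rfl
      | s0 :: ss =>
        simp [List.isPrefixOf] at hp
        exact hnl (by simp [hp.1])
    · exact go_fuel hs f b.length b acc (by omega) (le_refl _)

theorem go_split {sub : List Char} (hs : sub ≠ []) (hnl : '\n' ∉ sub) :
    ∀ (n : Nat) (a : List Char), a.length ≤ n → ∀ (fuel : Nat) (b : List Char) (acc : Nat),
      a.length + 1 + b.length ≤ fuel →
      PySem.Chars.count.go sub fuel (a ++ '\n' :: b) acc
        = PySem.Chars.count.go sub b.length b (PySem.Chars.count.go sub a.length a acc) := by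
  intro n
  induction n with
  | zero =>
    intro a ha fuel b acc hf
    have : a = [] := List.eq_nil_of_length_eq_zero (Nat.le_zero.mp ha)
    subst this
    simp only [List.nil_append, List.length_nil]
    rw [go_nil]
    exact go_split_nil hs hnl fuel b acc (by simpa using hf)
  | succ n ih =>
    intro a ha fuel b acc hf
    match a with
    | [] =>
      simp only [List.nil_append, List.length_nil]
      rw [go_nil]
      exact go_split_nil hs hnl fuel b acc (by simpa using hf)
    | x :: t =>
      have hsub1 : 1 ≤ sub.length := by
        cases sub with | nil => exact absurd rfl hs | cons a b => simp
      match fuel with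
      | 0 => simp at hf
      | f + 1 =>
        have hxe : (x :: t) ++ '\n' :: b = x :: (t ++ '\n' :: b) := by simp
        rw [hxe, PySem.Chars.count.go]
        split
        · rename_i hp
          rw [← hxe] at hp
          -- the match found sub to be a prefix of a ++ '\n' :: b
          have hpre : sub <+: ((x :: t) ++ '\n' :: b) := List.isPrefixOf_iff_prefix.mp hp
          have htake := List.prefix_iff_eq_take.mp hpre
          have hsub_le : sub.length ≤ ((x :: t) ++ '\n' :: b).length := by
            conv_lhs => rw [htake]
            simp
          have hsl : sub.length ≤ (x :: t).length := by
            by_contra hgt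
            push_neg at hgt
            apply hnl
            rw [htake]
            have hlt : (x :: t).length < (((x :: t) ++ '\n' :: b).take sub.length).length := by
              simp only [List.length_take, List.length_append, List.length_cons] at *
              omega
            have hnth : (((x :: t) ++ '\n' :: b).take sub.length)[(x :: t).length] = '\n' := by
              rw [List.getElem_take]
              rw [List.getElem_append_right (le_refl _)]
              simp
            conv_rhs => rw [← hnth]
            exact List.getElem_mem _
          have hpa : sub.isPrefixOf (x :: t) = true := by
            rw [List.isPrefixOf_iff_prefix]
            rw [htake, List.take_append_of_le_length hsl]
            exact List.take_prefix _ _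
          have hdrop : List.drop sub.length (x :: (t ++ '\n' :: b))
              = (x :: t).drop sub.length ++ '\n' :: b := by
            rw [← List.cons_append]
            exact List.drop_append_of_le_length hsl
          rw [hdrop]
          have hdl : ((x :: t).drop sub.length).length ≤ n := by
            simp [List.length_drop] at *
            omega
          rw [ih _ hdl f b (acc + 1) (by simp [List.length_drop] at *; omega)]
          -- now compute the RHS inner go on a
          have hR : PySem.Chars.count.go sub (x :: t).length (x :: t) acc
              = PySem.Chars.count.go sub ((x :: t).drop sub.length).length ((x :: t).drop sub.length) (acc + 1) := by
            simp only [List.length_cons]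
            rw [PySem.Chars.count.go]
            simp only [hpa, if_true]
            exact go_fuel hs t.length _ _ _ (by simp [List.length_drop]; omega) (le_refl _)
          rw [hR]
        · rename_i hp
          rw [← hxe] at hp
          have hpa : sub.isPrefixOf (x :: t) = false := by
            by_contra hc
            rw [Bool.not_eq_false] at hc
            apply hp
            rw [List.isPrefixOf_iff_prefix] at hc ⊢
            exact hc.trans (List.prefix_append _ _)
          rw [ih t (by simpa using ha) f b acc (by simp at *; omega)]
          have hR : PySem.Chars.count.go sub (x :: t).length (x :: t) acc
              = PySem.Chars.count.go sub t.length t acc := by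
            simp only [List.length_cons]
            rw [PySem.Chars.count.go]
            simp only [hpa]
            simp
          rw [hR]

theorem count_empty (s : List Char) : PySem.Chars.count s [] = s.length + 1 := by
  rw [PySem.Chars.count]; simp

theorem count_eq_go {sub : List Char} (hs : sub ≠ []) (s : List Char) :
    PySem.Chars.count s sub = PySem.Chars.count.go sub s.length s 0 := by
  rw [PySem.Chars.count]
  simp [List.isEmpty_iff, hs]

theorem count_add {sub : List Char} (hnl : '\n' ∉ sub) (a b : List Char) :
    PySem.Chars.count (a ++ '\n' :: b) sub = PySem.Chars.count a sub + PySem.Chars.count b sub := by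
  by_cases hs : sub = []
  · subst hs
    rw [count_empty, count_empty, count_empty]
    simp
    omega
  · rw [count_eq_go hs, count_eq_go hs, count_eq_go hs]
    rw [go_split hs hnl a.length a (le_refl _) (a ++ '\n' :: b).length b 0 (by simp; omega)]
    rw [go_acc sub b.length b (PySem.Chars.count.go sub a.length a 0)]

theorem join_snoc : ∀ (buf : List (List Char)), buf ≠ [] → ∀ (r : List Char),
    PySem.Chars.join ['\n'] (buf ++ [r]) = PySem.Chars.join ['\n'] buf ++ '\n' :: r := by
  intro buf
  induction buf with
  | nil => intro h; exact absurd rfl h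
  | cons x ys ih =>
    intro _ r
    cases ys with
    | nil =>
      simp only [List.cons_append, List.nil_append]
      rw [PySem.Chars.join_cons_cons, PySem.Chars.join_singleton, PySem.Chars.join_singleton]
      simp
    | cons y ys' =>
      simp only [List.cons_append]
      rw [PySem.Chars.join_cons_cons]
      conv_rhs => rw [PySem.Chars.join_cons_cons]
      have hih := ih (by simp) r
      simp only [List.cons_append] at hih
      rw [hih]
      simp

theorem count_zero_of_mem {tq : List Char} (hm : '\n' ∈ tq) {s : List Char} (hns : '\n' ∉ s) :
    PySem.Chars.count s tq = 0 := by
  have hne : tq ≠ [] := by intro h; subst h; simp at hm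
  rw [count_eq_go hne]
  exact go_of_not_mem hm s.length s 0 hns

theorem splitgo_free : ∀ (fuel : Nat) (l cur : List Char) (acc : List (List Char)),
    l.length < fuel → (∀ p ∈ acc, '\n' ∉ p) → '\n' ∉ cur →
    ∀ p ∈ PySem.Chars.splitOn.go ['\n'] fuel l cur acc, '\n' ∉ p := by
  intro fuel
  induction fuel with
  | zero => intro l cur acc h; omega
  | succ f ih =>
    intro l cur acc h hacc hcur
    match l with
    | [] =>
      rw [PySem.Chars.splitOn.go]
      case x_5 => omega
      intro p hp
      simp only [List.mem_reverse, List.mem_cons] at hp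
      rcases hp with hp | hp
      · subst hp; simpa using hcur
      · exact hacc p hp
    | c :: rest =>
      rw [PySem.Chars.splitOn.go]
      split
      · rename_i hpf
        simp only [List.isPrefixOf, List.isPrefixOf_nil_left, Bool.and_true, beq_iff_eq] at hpf
        intro p hp
        refine ih _ _ _ (by simp at h ⊢; omega) ?_ (by simp) p hp
        intro q hq
        simp only [List.mem_cons] at hq
        rcases hq with hq | hq
        · subst hq; simpa using hcur
        · exact hacc q hq
      · rename_i hpf
        simp only [List.isPrefixOf, List.isPrefixOf_nil_left, Bool.and_true, beq_iff_eq] at hpf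
        intro p hp
        refine ih _ _ _ (by simp at h ⊢; omega) hacc ?_ p hp
        simp only [List.mem_cons]
        rintro (hq | hq)
        · exact hpf hq
        · exact hcur hq

theorem split_free (s : List Char) : ∀ p ∈ PySem.Chars.splitOn s ['\n'], '\n' ∉ p := by
  rw [PySem.Chars.splitOn]
  exact splitgo_free (s.length + 1) s [] [] (by omega) (by simp) (by simp)

-- A-side single-step characterizations of aLoopA -----------------------------

theorem pyGet?_snoc_cons {α : Type} (out : List α) (cur r : α) (rs : List α) :
    PySem.List.pyGet? (out ++ cur :: r :: rs) ((out.length : Int) + 1) = some r := by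
  have h : out ++ cur :: r :: rs = (out ++ [cur]) ++ r :: rs := by simp
  have h2 : ((out.length : Int) + 1) = (((out ++ [cur]).length : Nat) : Int) := by simp
  rw [h, h2, PySem.List.pyGet?_append_length]

theorem pyGet?_last_none {α : Type} (out : List α) (cur : α) :
    PySem.List.pyGet? (out ++ [cur]) ((out.length : Int) + 1) = none := by
  have h2 : ((out.length : Int) + 1) = (((out.length + 1 : Nat)) : Int) := by push_cast; ring
  rw [h2, PySem.List.pyGet?_natCast]
  simp

theorem stepA_none (tq : List Char) (lim : Option Int) (out : List (List Char)) :
    aLoopA tq lim out out.length = out := by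
  rw [aLoopA.eq_def]
  split
  · rfl
  · rename_i cur heq
    rw [PySem.List.pyGet?_natCast] at heq
    have := (List.getElem?_eq_some_iff.mp heq).1
    omega

theorem stepA_even_none (tq : List Char) (out : List (List Char))
    (cur : List Char) (rs : List (List Char)) (h : PySem.Chars.count cur tq % 2 = 0) :
    aLoopA tq none (out ++ cur :: rs) out.length = aLoopA tq none (out ++ cur :: rs) (out.length + 1) := by
  conv_lhs => rw [aLoopA.eq_def]
  split
  · rename_i heq
    rw [PySem.List.pyGet?_append_length] at heq
    cases heq
  · rename_i cur' heq
    rw [PySem.List.pyGet?_append_length] at heq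
    injection heq with heq'
    subst heq'
    rw [if_neg (by omega)]

theorem stepA_even_some (tq : List Char) (k : Int) (out : List (List Char))
    (cur : List Char) (rs : List (List Char)) (h : PySem.Chars.count cur tq % 2 = 0) :
    aLoopA tq (some k) (out ++ cur :: rs) out.length =
      if k ≠ 0 ∧ ((out.length : Int) + 1 > k) then PySem.List.slice (out ++ cur :: rs) none (some k)
      else aLoopA tq (some k) (out ++ cur :: rs) (out.length + 1) := by
  conv_lhs => rw [aLoopA.eq_def]
  split
  · rename_i heq
    rw [PySem.List.pyGet?_append_length] at heq
    cases heq
  · rename_i cur' heq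
    rw [PySem.List.pyGet?_append_length] at heq
    injection heq with heq'
    subst heq'
    rw [if_neg (by omega)]

theorem stepA_odd_nil (tq : List Char) (lim : Option Int) (out : List (List Char))
    (cur : List Char) (h : PySem.Chars.count cur tq % 2 ≠ 0) :
    aLoopA tq lim (out ++ [cur]) out.length = out ++ [cur] := by
  rw [aLoopA.eq_def]
  split
  · rfl
  · rename_i cur' heq
    rw [PySem.List.pyGet?_append_length] at heq
    injection heq with heq'
    subst heq'
    rw [if_pos h, pyGet?_last_none]

theorem stepA_odd_cons (tq : List Char) (lim : Option Int) (out : List (List Char))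
    (cur r : List Char) (rs : List (List Char)) (h : PySem.Chars.count cur tq % 2 ≠ 0) :
    aLoopA tq lim (out ++ cur :: r :: rs) out.length
      = aLoopA tq lim (out ++ (cur ++ '\n' :: r) :: rs) out.length := by
  conv_lhs => rw [aLoopA.eq_def]
  split
  · rename_i heq
    rw [PySem.List.pyGet?_append_length] at heq
    cases heq
  · rename_i cur' heq
    rw [PySem.List.pyGet?_append_length] at heq
    injection heq with heq'
    subst heq'
    rw [if_pos h, pyGet?_snoc_cons]
    split
    · rename_i heq2
      cases heq2
    rename_i nxt heq2
    injection heq2 with heq2'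
    subst heq2'
    -- reduce the mutated list: set at `line`, then delete index `line + 1`
    have harg : ((PySem.List.pySetD (out ++ cur :: r :: rs) ((out.length : Int)) (cur ++ '\n' :: r)).eraseIdx (out.length + 1))
        = out ++ (cur ++ '\n' :: r) :: rs := by
      rw [PySem.List.pySetD_natCast, List.set_append, if_neg (by omega)]
      simp only [Nat.sub_self, List.set_cons_zero]
      rw [List.eraseIdx_append, if_neg (by omega)]
      simp [List.eraseIdx]
    rw [harg]

-- the group-closing limit cut: both truncations agree (the cut index lies inside `out`)
theorem stop_eq (out : List (List Char)) (cur : List Char) (rs : List (List Char)) (k : Int)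
    (hk : 0 ≤ k) (hlt : k < (out.length : Int) + 1) :
    filtNE (PySem.List.slice (out ++ cur :: rs) none (some k))
      = filtNE (PySem.List.slice (out ++ [cur]) none (some k)) := by
  rw [PySem.List.slice_to _ hk, PySem.List.slice_to _ hk]
  have hkn : k.toNat ≤ out.length := by omega
  rw [List.take_append_of_le_length hkn, List.take_append_of_le_length hkn]

-- B's loop when the running parity stays odd: absorb the line into the buffer
theorem bLoopB_cons_odd (tq : List Char) (lim : Option Int) (r : List Char) (rs : List (List Char))
    (out buf : List (List Char)) (parity : Nat) (h : ¬ ((parity + PySem.Chars.count r tq) % 2 = 0)) :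
    bLoopB tq lim (r :: rs) out buf parity
      = bLoopB tq lim rs out (buf ++ [r]) ((parity + PySem.Chars.count r tq) % 2) := by
  cases lim <;> rw [bLoopB] <;> rw [if_neg h]

-- the heart: A's cursor loop equals B's single pass (induction on the unprocessed suffix)
theorem bridge (tq : List Char) (lim : Option Int) (hlim : 0 ≤ lim.getD 0) :
    ∀ n : Nat,
      (∀ rest out, rest.length ≤ n →
          (∀ s ∈ rest, '\n' ∈ tq → PySem.Chars.count s tq % 2 = 0) →
          filtNE (aLoopA tq lim (out ++ rest) out.length) = bLoopB tq lim rest out [] 0)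
      ∧ (∀ rest buf out, rest.length ≤ n → buf ≠ [] → '\n' ∉ tq →
          PySem.Chars.count (PySem.Chars.join ['\n'] buf) tq % 2 = 1 →
          filtNE (aLoopA tq lim (out ++ PySem.Chars.join ['\n'] buf :: rest) out.length) = bLoopB tq lim rest out buf 1) := by
  intro n
  induction n with
  | zero =>
    constructor
    · intro rest out hle _hl
      have hr : rest = [] := List.eq_nil_of_length_eq_zero (Nat.le_zero.mp hle)
      subst hr
      rw [List.append_nil, stepA_none, bLoopB]
      simp [filtNE]
    · intro rest buf out hle hbuf _hnl hodd
      have hr : rest = [] := List.eq_nil_of_length_eq_zero (Nat.le_zero.mp hle)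
      subst hr
      rw [show out ++ PySem.Chars.join ['\n'] buf :: ([] : List (List Char)) = out ++ [PySem.Chars.join ['\n'] buf] from rfl]
      rw [stepA_odd_nil tq lim out _ (by omega), bLoopB]
      simp [filtNE, List.isEmpty_iff, hbuf]
  | succ n ih =>
    obtain ⟨ih0, ih1⟩ := ih
    constructor
    · -- P0 at n+1
      intro rest out hle hl
      cases rest with
      | nil => exact ih0 [] out (by simp) hl
      | cons r rs =>
        have hrec : filtNE (aLoopA tq lim (out ++ r :: rs) (out.length + 1)) = bLoopB tq lim rs (out ++ [r]) [] 0 := by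
          rw [show out ++ r :: rs = (out ++ [r]) ++ rs by simp,
              show out.length + 1 = (out ++ [r]).length by simp]
          exact ih0 rs (out ++ [r]) (by simpa using hle) (fun s hs => hl s (List.mem_cons_of_mem _ hs))
        by_cases heven : PySem.Chars.count r tq % 2 = 0
        · -- the head line closes a group on its own
          cases lim with
          | none =>
            rw [stepA_even_none tq out r rs heven, bLoopB]
            rw [if_pos (by omega : (0 + PySem.Chars.count r tq) % 2 = 0)]
            simp only [PySem.Chars.join_singleton, List.nil_append]
            exact hrec
          | some k =>
            have hk : 0 ≤ k := by simpa using hlim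
            rw [stepA_even_some tq k out r rs heven, bLoopB]
            rw [if_pos (by omega : (0 + PySem.Chars.count r tq) % 2 = 0)]
            simp only [PySem.Chars.join_singleton, List.nil_append, List.length_append,
              List.length_cons, List.length_nil]
            push_cast
            by_cases hstop : k ≠ 0 ∧ ((out.length : Int) + 1 > k)
            · rw [if_pos hstop, if_pos (by exact ⟨hstop.1, by have := hstop.2; omega⟩)]
              exact stop_eq out r rs k hk (by omega)
            · rw [if_neg hstop, if_neg (by intro hc; exact hstop ⟨hc.1, by have := hc.2; omega⟩)]
              exact hrec
        · -- the head line opens a quoted group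
          have hnl : '\n' ∉ tq := by
            intro hm
            exact heven (hl r List.mem_cons_self hm)
          have h1 := ih1 rs [r] out (by simpa using hle) (by simp) hnl
            (by rw [PySem.Chars.join_singleton]; omega)
          rw [PySem.Chars.join_singleton] at h1
          have hb : bLoopB tq lim (r :: rs) out [] 0 = bLoopB tq lim rs out [r] 1 := by
            rw [bLoopB_cons_odd tq lim r rs out [] 0 (by omega)]
            rw [show (0 + PySem.Chars.count r tq) % 2 = 1 by omega]
            simp
          rw [hb]
          exact h1
    · -- P1 at n+1
      intro rest buf out hle hbuf hnl hodd
      cases rest with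
      | nil => exact ih1 [] buf out (by simp) hbuf hnl hodd
      | cons r rs =>
        rw [stepA_odd_cons tq lim out _ r rs (by omega)]
        have hjoin : PySem.Chars.join ['\n'] buf ++ '\n' :: r = PySem.Chars.join ['\n'] (buf ++ [r]) :=
          (join_snoc buf hbuf r).symm
        have hcnt : PySem.Chars.count (PySem.Chars.join ['\n'] (buf ++ [r])) tq % 2
            = (1 + PySem.Chars.count r tq) % 2 := by
          rw [← hjoin, count_add hnl]
          omega
        rw [hjoin]
        have hrec : filtNE (aLoopA tq lim (out ++ PySem.Chars.join ['\n'] (buf ++ [r]) :: rs) (out.length + 1))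
            = bLoopB tq lim rs (out ++ [PySem.Chars.join ['\n'] (buf ++ [r])]) [] 0 := by
          rw [show out ++ PySem.Chars.join ['\n'] (buf ++ [r]) :: rs = (out ++ [PySem.Chars.join ['\n'] (buf ++ [r])]) ++ rs by simp]
          rw [show out.length + 1 = (out ++ [PySem.Chars.join ['\n'] (buf ++ [r])]).length by simp]
          exact ih0 rs _ (by simpa using hle) (fun s _ hm => absurd hm hnl)
        by_cases hpar : (1 + PySem.Chars.count r tq) % 2 = 0
        · -- the group closes at r
          cases lim with
          | none =>
            rw [stepA_even_none tq out _ rs (by omega), bLoopB]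
            rw [if_pos (by omega : (1 + PySem.Chars.count r tq) % 2 = 0)]
            exact hrec
          | some k =>
            have hk : 0 ≤ k := by simpa using hlim
            rw [stepA_even_some tq k out _ rs (by omega), bLoopB]
            rw [if_pos (by omega : (1 + PySem.Chars.count r tq) % 2 = 0)]
            simp only [List.length_append, List.length_cons, List.length_nil]
            push_cast
            by_cases hstop : k ≠ 0 ∧ ((out.length : Int) + 1 > k)
            · rw [if_pos hstop, if_pos (by exact ⟨hstop.1, by have := hstop.2; omega⟩)]
              exact stop_eq out _ rs k hk (by omega)
            · rw [if_neg hstop, if_neg (by intro hc; exact hstop ⟨hc.1, by have := hc.2; omega⟩)]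
              exact hrec
        · -- still odd: keep absorbing lines
          have h1 := ih1 rs (buf ++ [r]) out (by simpa using hle) (by simp) hnl (by omega)
          have hb : bLoopB tq lim (r :: rs) out buf 1 = bLoopB tq lim rs out (buf ++ [r]) 1 := by
            rw [bLoopB_cons_odd tq lim r rs out buf 1 (by omega)]
            rw [show (1 + PySem.Chars.count r tq) % 2 = 1 by omega]
          rw [hb]
          exact h1

-- ===== VERDICT (by name: the statement is the Claim_ definition above) =====
theorem organizeIntoLines_spec : Claim_equal_organizeIntoLines := by
  intro input tq lim _hdom hpre
  unfold Spec_organizeIntoLines organizeIntoLines organizeIntoLines_alt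
  obtain ⟨h0, -⟩ := bridge tq.toList lim hpre (PySem.Chars.splitOn input.toList ['\n']).length
  have hl : ∀ s ∈ PySem.Chars.splitOn input.toList ['\n'], '\n' ∈ tq.toList → PySem.Chars.count s tq.toList % 2 = 0 := by
    intro s hs hm
    rw [count_zero_of_mem hm (split_free _ s hs)]
  have hmain := h0 (PySem.Chars.splitOn input.toList ['\n']) [] (le_refl _) hl
  simp only [List.nil_append, List.length_nil, filtNE] at hmain
  rw [hmain]
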